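-- pv_equiv track=rewrite | github.com/GenryEden/kpolyakovName | 26.py | f
-- ===== SOURCE A (Python) =====
-- def f(x):
-- 	if x < 2:
-- 		return 0
-- 	elif x == 2:
-- 		return 1
-- 	elif x == 25:
-- 		return 0
-- 	else:
-- 		ans = 0
-- 		ans += f(x-1)
-- 		if x % 2 == 0 and not(x//2 < 14 < x):
-- 			ans += f(x//2)
-- 		return ans
-- ===== SOURCE B (Python) =====
-- def f(x):
--     if x < 2:
--         return 0
--     dp = [0, 0, 1]  # dp[n] holds the answer for n; bottom-up instead of recursion
--     for n in range(3, x + 1):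
--         if n == 25:
--             v = 0
--         else:
--             v = dp[n - 1]
--             if n % 2 == 0 and not (n // 2 < 14 < n):
--                 v += dp[n // 2]
--         dp.append(v)
--     return dp[x]
-- ===== Notes on version B (the rewrite author's own statement) =====
-- stated objective: faster
-- what changed: Replaces the branching recursion with a bottom-up dynamic-programming table dp[2..x] filled once in a single loop, so each value is computed exactly once.
import Mathlib
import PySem

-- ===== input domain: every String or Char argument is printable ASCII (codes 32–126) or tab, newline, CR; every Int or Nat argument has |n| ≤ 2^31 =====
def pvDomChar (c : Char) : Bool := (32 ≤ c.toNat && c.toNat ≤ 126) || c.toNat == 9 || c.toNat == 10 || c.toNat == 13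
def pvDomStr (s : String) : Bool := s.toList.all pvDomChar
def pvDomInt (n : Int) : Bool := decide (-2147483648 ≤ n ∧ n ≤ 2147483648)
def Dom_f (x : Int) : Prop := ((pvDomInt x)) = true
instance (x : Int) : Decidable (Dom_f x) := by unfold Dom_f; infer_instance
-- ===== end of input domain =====

-- B replaces A's branching recursion by a bottom-up DP table over 2..x (asymptotically faster).


-- ===== PORT A =====
def f (x : Int) : Int :=
  if _h1 : x < 2 then 0
  else if _h2 : x = 2 then 1
  else if x = 25 then 0
  else
    let ans := f (x - 1)
    if PySem.Int.mod x 2 = 0 ∧ ¬(PySem.Int.floordiv x 2 < 14 ∧ 14 < x) then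
      ans + f (PySem.Int.floordiv x 2)
    else ans
termination_by x.toNat
decreasing_by
  · omega
  · have : PySem.Int.floordiv x 2 = x / 2 :=
      PySem.Int.floordiv_eq_ediv_of_pos (by omega)
    rw [this]; omega

-- ===== PORT B =====
def f_alt (x : Int) : Int :=
  if x < 2 then 0
  else
    let dp := (PySem.List.pyRange 3 (x + 1) 1).foldl (fun dp n =>
      let v :=
        if n = 25 then 0
        else
          let v := PySem.List.pyGetD dp (n - 1) 0
          if PySem.Int.mod n 2 = 0 ∧ ¬(PySem.Int.floordiv n 2 < 14 ∧ 14 < n) then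
            v + PySem.List.pyGetD dp (PySem.Int.floordiv n 2) 0
          else v
      dp ++ [v]) [0, 0, 1]
    PySem.List.pyGetD dp x 0

-- ===== PRECONDITION & SPEC =====
-- Pre_ excludes large x: A's first recursive call dives f(x) → f(x-1) → … → f(2), needing one
-- stack frame per step at once, so beyond CPython's default recursion limit A raises
-- RecursionError; the bound below is the guaranteed-safe side of that limit (the exact cut-off
-- shifts by a few frames with the call context). On every admitted input A returns normally.
def Pre_f (x : Int) : Prop := x ≤ 996
instance (x : Int) : Decidable (Pre_f x) := by unfold Pre_f; infer_instance
def pvWitness_f : Int := (10)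

def Spec_f (x : Int) (out : Int) : Prop := out = f_alt x
instance (x : Int) (out : Int) : Decidable (Spec_f x out) := by unfold Spec_f; infer_instance

-- ===== CLAIM (what is proved, stated in full; the proofs are below) =====
def Claim_equal_f : Prop := ∀ (x : Int), Dom_f x → Pre_f x → Spec_f x (f x)

-- ===== LEMMAS AND PROOFS =====

-- the DP loop body of f_alt, named for the proofs
def fStep (dp : List Int) (n : Int) : List Int :=
  let v :=
    if n = 25 then 0
    else
      let v := PySem.List.pyGetD dp (n - 1) 0
      if PySem.Int.mod n 2 = 0 ∧ ¬(PySem.Int.floordiv n 2 < 14 ∧ 14 < n) then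
        v + PySem.List.pyGetD dp (PySem.Int.floordiv n 2) 0
      else v
  dp ++ [v]

theorem f_alt_eq_foldl (x : Int) (h : ¬ x < 2) :
    f_alt x = PySem.List.pyGetD
      ((PySem.List.pyRange 3 (x + 1) 1).foldl fStep [0, 0, 1]) x 0 := by
  unfold f_alt fStep
  rw [if_neg h]

theorem f_zero : f 0 = 0 := by rw [f]; norm_num
theorem f_one : f 1 = 0 := by rw [f]; norm_num
theorem f_two : f 2 = 1 := by rw [f]; norm_num

-- invariant: after processing range(3, k+1) the table has length k+1 and holds f at every index ≤ k
theorem dp_invariant (k : Nat) (hk : 2 ≤ k) :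
    ((PySem.List.pyRange 3 ((k : Int) + 1) 1).foldl fStep [0, 0, 1]).length = k + 1 ∧
    ∀ i : Nat, i ≤ k →
      ((PySem.List.pyRange 3 ((k : Int) + 1) 1).foldl fStep [0, 0, 1]).getD i 0 = f (i : Int) := by
  induction k with
  | zero => omega
  | succ k ih =>
    rcases Nat.lt_or_ge k 2 with hk2 | hk2
    · -- base case k+1 = 2 (k < 2 forces k = 1 here)
      have hk1 : k = 1 := by omega
      subst hk1
      have h3 : (((1 + 1 : Nat) : Int) + 1) = 3 := by norm_num
      rw [h3, PySem.List.pyRange_one_eq_nil le_rfl]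
      refine ⟨rfl, ?_⟩
      intro i hi
      interval_cases i
      · exact f_zero.symm
      · exact f_one.symm
      · exact f_two.symm
    · obtain ⟨hlen, hval⟩ := ih hk2
      have hcast : (((k + 1 : Nat)) : Int) = (k : Int) + 1 := by push_cast; ring
      have hsplit : PySem.List.pyRange 3 ((k : Int) + 1 + 1) 1 =
          PySem.List.pyRange 3 ((k : Int) + 1) 1 ++ [((k : Int) + 1)] := by
        exact PySem.List.pyRange_one_succ_right (by omega)
      set dp := (PySem.List.pyRange 3 ((k : Int) + 1) 1).foldl fStep [0, 0, 1] with hdp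
      have hfold : (PySem.List.pyRange 3 ((k : Int) + 1 + 1) 1).foldl fStep [0, 0, 1] =
          fStep dp ((k : Int) + 1) := by
        rw [hsplit, List.foldl_append]; rfl
      have hget : ∀ j : Nat, j ≤ k → PySem.List.pyGetD dp ((j : Int)) 0 = f (j : Int) := by
        intro j hj
        rw [PySem.List.pyGetD_natCast]
        exact hval j hj
      have hstep : fStep dp ((k : Int) + 1) = dp ++ [f ((k : Int) + 1)] := by
        unfold fStep
        by_cases h25 : ((k : Int) + 1) = 25
        · rw [f]
          simp [h25]
        · have hnot2 : ¬ ((k : Int) + 1 < 2) := by omega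
          have hne2 : ((k : Int) + 1) ≠ 2 := by omega
          have hprev : PySem.List.pyGetD dp ((k : Int) + 1 - 1) 0 = f (k : Int) := by
            have : ((k : Int) + 1 - 1) = ((k : Nat) : Int) := by omega
            rw [this]; exact hget k le_rfl
          have hhalfNat : PySem.Int.floordiv ((k : Int) + 1) 2 = (((k + 1) / 2 : Nat) : Int) := by
            rw [PySem.Int.floordiv_eq_ediv_of_pos (by omega)]
            push_cast
            omega
          have hhalf : PySem.List.pyGetD dp ((((k + 1) / 2 : Nat)) : Int) 0 =
              f ((((k + 1) / 2 : Nat)) : Int) := hget ((k + 1) / 2) (by omega)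
          conv_rhs => rw [f]
          rw [dif_neg hnot2, dif_neg hne2, if_neg h25]
          rw [show ((k : Int) + 1 - 1) = ((k : Nat) : Int) by omega]
          simp only [if_neg h25, hget k le_rfl, hhalfNat, hhalf]
      refine ⟨?_, ?_⟩
      · rw [hcast, hfold, hstep]
        simp [hlen]
      · intro i hi
        rw [hcast, hfold, hstep]
        rcases Nat.lt_or_ge i (k + 1) with hik | hik
        · rw [List.getD_append _ _ _ _ (by omega)]
          exact hval i (by omega)
        · have hik' : i = k + 1 := by omega
          subst hik'
          rw [List.getD_append_right _ _ _ _ (by omega)]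
          simp [hlen, hcast]

-- ===== VERDICT (by name: the statement is the Claim_ definition above) =====
theorem f_spec : Claim_equal_f := by
  intro x _ _
  unfold Spec_f
  by_cases h : x < 2
  · rw [f, f_alt]; simp [h]
  · have hk : 2 ≤ x.toNat := by omega
    obtain ⟨hlen, hval⟩ := dp_invariant x.toNat hk
    rw [f_alt_eq_foldl x h]
    have hx : x = ((x.toNat : Nat) : Int) := by omega
    rw [hx, PySem.List.pyGetD_natCast]
    exact (hval x.toNat le_rfl).symm
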